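-- pv_equiv track=rewrite | github.com/ai-village-agents/framework-reflections-2026 | analysis/analyze_structural_determinism_probe.py | build_coinage_contexts
-- ===== SOURCE A (Python) =====
-- from typing import Dict, List, Set
--
-- COINAGE_TOKEN: Dict[str, str] = {
--     "opus": "green-room-drift",
--     "deepseek": "gradient-drift",
--     "gpt5_1": "chambers-current",
--     "sonnet": "rehearsal-drift",
--     "gpt5_2": "pan-whisper",
--     "haiku": "tidal-stretch",
-- }
--
-- def build_coinage_contexts(tokens_by_agent: Dict[str, List[str]], window: int = 10) -> Dict[str, Set[str]]:
--     """Collect +/- window tokens around each coinage token for each agent."""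
--
--     contexts: Dict[str, Set[str]] = {}
--     for agent_key, tokens in tokens_by_agent.items():
--         metaphor = COINAGE_TOKEN.get(agent_key)
--         if metaphor is None:
--             raise ValueError(f"No coinage token registered for agent '{agent_key}'")
--
--         positions = [i for i, tok in enumerate(tokens) if tok == metaphor]
--         if not positions:
--             # Be explicit if the metaphor token is missing; this would indicate
--             # a mismatch between the hard-coded token and the text.
--             raise ValueError(
--                 f"Could not find metaphor token '{metaphor}' in response for agent '{agent_key}'"
--             )
--
--         ctx: Set[str] = set()
--         for pos in positions:
--             start = max(0, pos - window)
--             end = min(len(tokens), pos + window + 1)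
--             ctx.update(tokens[start:end])
--         contexts[agent_key] = ctx
--     return contexts
-- ===== SOURCE B (Python) =====
-- from typing import Dict, List, Set
--
-- COINAGE_TOKEN: Dict[str, str] = {
--     "opus": "green-room-drift",
--     "deepseek": "gradient-drift",
--     "gpt5_1": "chambers-current",
--     "sonnet": "rehearsal-drift",
--     "gpt5_2": "pan-whisper",
--     "haiku": "tidal-stretch",
-- }
--
-- def build_coinage_contexts(tokens_by_agent: Dict[str, List[str]], window: int = 10) -> Dict[str, Set[str]]:
--     """Nearest-occurrence-distance algorithm: two linear sweeps compute, for every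
--     position, the distance to the closest metaphor occurrence; a token is in the
--     context iff that distance is <= window.  No per-occurrence slicing."""
--     contexts: Dict[str, Set[str]] = {}
--     for agent_key, tokens in tokens_by_agent.items():
--         metaphor = COINAGE_TOKEN.get(agent_key)
--         if metaphor is None:
--             raise ValueError(f"No coinage token registered for agent '{agent_key}'")
--         if metaphor not in tokens:
--             raise ValueError(
--                 f"Could not find metaphor token '{metaphor}' in response for agent '{agent_key}'"
--             )
--         n = len(tokens)
--         big = n + 1  # larger than any real distance
--         left = [0] * n   # distance to nearest occurrence at or before j (big-ish if none)
--         d = big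
--         for j in range(n):
--             d = 0 if tokens[j] == metaphor else d + 1
--             left[j] = d
--         right = [0] * n  # distance to nearest occurrence at or after j
--         d = big
--         for j in range(n - 1, -1, -1):
--             d = 0 if tokens[j] == metaphor else d + 1
--             right[j] = d
--         contexts[agent_key] = {tokens[j] for j in range(n) if min(left[j], right[j]) <= window}
--     return contexts
-- ===== Notes on version B (the rewrite author's own statement) =====
-- stated objective: alternative
-- what changed: B replaces A's per-occurrence slice union (collect positions, then union tokens[pos-w:pos+w+1] per occurrence) by a nearest-occurrence-distance algorithm: two linear sweeps compute each position's distance to the closest metaphor occurrence and a token is kept iff that distance is <= window, making the work per agent O(n) independent of window and occurrence count.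
-- intended difference: On inputs with window < 0 where some agent's metaphor occurs at position j with j + window + 1 < 0 and len(tokens) + 2*window + 1 > 0, A's slice end min(len, j+window+1) is negative so Python's wraparound yields an accidental non-empty context set, while B returns the intended empty set (a negative window covers no tokens). — e.g. on build_coinage_contexts([("haiku", ["tidal-stretch", "a", "b", "c", "d", "e", "f", "g"])], -4): A returns [("haiku", ["d"])], B returns [("haiku", [])]
import Mathlib
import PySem

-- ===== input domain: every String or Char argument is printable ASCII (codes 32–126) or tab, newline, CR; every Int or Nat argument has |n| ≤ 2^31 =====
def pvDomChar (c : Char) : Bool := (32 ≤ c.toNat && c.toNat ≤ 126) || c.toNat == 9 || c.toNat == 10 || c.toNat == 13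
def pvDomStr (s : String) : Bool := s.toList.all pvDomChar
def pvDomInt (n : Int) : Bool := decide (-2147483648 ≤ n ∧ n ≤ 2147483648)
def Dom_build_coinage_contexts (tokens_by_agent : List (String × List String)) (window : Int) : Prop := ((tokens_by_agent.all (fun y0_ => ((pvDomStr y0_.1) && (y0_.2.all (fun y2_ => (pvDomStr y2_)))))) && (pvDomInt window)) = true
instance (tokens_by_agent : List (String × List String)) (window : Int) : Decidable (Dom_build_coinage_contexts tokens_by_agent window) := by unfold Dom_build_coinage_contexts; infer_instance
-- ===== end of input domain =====

-- B replaces A's per-occurrence slice union by a nearest-occurrence-distance algorithm (two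
-- linear sweeps; a token is kept iff its distance to the closest metaphor occurrence is ≤ window).
-- On negative windows A's slice end underflows and Python wraps it (see D_ below); B returns the
-- intended empty context there.

def pvCoinage : PySem.Dict String String :=
  PySem.Dict.ofList
    [("opus", "green-room-drift"), ("deepseek", "gradient-drift"), ("gpt5_1", "chambers-current"),
     ("sonnet", "rehearsal-drift"), ("gpt5_2", "pan-whisper"), ("haiku", "tidal-stretch")]

-- ===== PORT A =====
-- ctx = set(); for pos in positions: ctx.update(tokens[max(0,pos-window):min(len(tokens),pos+window+1)])
def pvCtxA (tokens : List String) (window : Int) (positions : List Int) : PySem.Set String :=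
  positions.foldl
    (fun ctx pos =>
      PySem.Set.update ctx
        (PySem.List.slice tokens (some (max 0 (pos - window)))
          (some (min (tokens.length : Int) (pos + window + 1)))))
    PySem.Set.empty

-- one iteration of A's per-agent loop
def pvStepA (window : Int) (contexts : PySem.Dict String (PySem.Set String)) (p : String × List String) : PySem.Dict String (PySem.Set String) :=
  match PySem.Dict.get? pvCoinage p.1 with
  | none => contexts  -- Python raises ValueError here (outside Pre_)
  | some metaphor =>
    let positions : List Int :=
      (PySem.List.enumerate p.2 0).foldl
        (fun acc q => if q.2 == metaphor then acc ++ [q.1] else acc) []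
    if positions = [] then contexts  -- Python raises ValueError here (outside Pre_)
    else PySem.Dict.insert contexts p.1 (pvCtxA p.2 window positions)

def build_coinage_contexts (tokens_by_agent : List (String × List String)) (window : Int) : List (String × List String) :=
  (tokens_by_agent.foldl (pvStepA window) PySem.Dict.empty).items

-- ===== PORT B =====
-- forward sweep: d = big; for j in range(n): d = 0 if tokens[j] == metaphor else d + 1; left[j] = d
-- (iterating j over range(n) and reading tokens[j] is iterating the tokens in order; left is built index-ascending)
def pvLeft (metaphor : String) (big : Int) (tokens : List String) : List Int :=
  (tokens.foldl
    (fun (st : Int × List Int) tok =>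
      let d := if tok == metaphor then 0 else st.1 + 1
      (d, st.2 ++ [d]))
    (big, [])).2

-- backward sweep: d = big; for j in range(n-1,-1,-1): d = 0 if tokens[j] == metaphor else d + 1; right[j] = d
-- (the descending index loop reads the tokens reversed; writing right[j] at descending j is prepending)
def pvRight (metaphor : String) (big : Int) (tokens : List String) : List Int :=
  (tokens.reverse.foldl
    (fun (st : Int × List Int) tok =>
      let d := if tok == metaphor then 0 else st.1 + 1
      (d, d :: st.2))
    (big, [])).2

-- one iteration of B's per-agent loop
def pvStepB (window : Int) (contexts : PySem.Dict String (PySem.Set String)) (p : String × List String) : PySem.Dict String (PySem.Set String) :=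
  match PySem.Dict.get? pvCoinage p.1 with
  | none => contexts  -- Python raises ValueError here (outside Pre_)
  | some metaphor =>
    if p.2.contains metaphor = false then contexts  -- Python raises ValueError here (outside Pre_)
    else
      let n := p.2.length
      let big : Int := (n : Int) + 1
      let left := pvLeft metaphor big p.2
      let right := pvRight metaphor big p.2
      PySem.Dict.insert contexts p.1
        (PySem.Set.ofList
          (((List.range n).filter
              (fun j => decide (min (left.getD j 0) (right.getD j 0) ≤ window))).map
            (fun j => p.2.getD j "")))

def build_coinage_contexts_alt (tokens_by_agent : List (String × List String)) (window : Int) : List (String × List String) :=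
  (tokens_by_agent.foldl (pvStepB window) PySem.Dict.empty).items

-- ===== PRECONDITION & SPEC =====
-- Pre_: the association list models a Python dict, so agent keys are distinct; every agent key is
-- registered in COINAGE_TOKEN and its metaphor occurs among its tokens (exactly the inputs on
-- which Python A returns; elsewhere it raises ValueError).
def Pre_build_coinage_contexts (tokens_by_agent : List (String × List String)) (window : Int) : Prop :=
  (tokens_by_agent.map (·.1)).Nodup ∧
  (tokens_by_agent.all (fun p =>
    match PySem.Dict.get? pvCoinage p.1 with
    | none => false
    | some metaphor => p.2.contains metaphor)) = true

instance (tokens_by_agent : List (String × List String)) (window : Int) : Decidable (Pre_build_coinage_contexts tokens_by_agent window) := by unfold Pre_build_coinage_contexts; infer_instance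

def pvWitness_build_coinage_contexts : (List (String × List String)) × Int :=
  ([("opus", ["a", "green-room-drift", "b"]), ("haiku", ["tidal-stretch"])], 1)

-- On inputs where window < 0 and some agent has a metaphor occurrence at position j with
-- j + window + 1 < 0 while len(tokens) + 2*window + 1 > 0, A's slice end min(len, j+window+1) is
-- negative and Python's negative-bound wraparound puts accidental tokens in the context, whereas
-- B returns the intended empty context (a negative window covers nothing).
def D_build_coinage_contexts (tokens_by_agent : List (String × List String)) (window : Int) : Prop :=
  window < 0 ∧ ∃ p ∈ tokens_by_agent,
    ((p.2.length : Int) + 2 * window + 1 > 0 ∧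
     ∃ j ∈ List.range p.2.length,
       ((j : Int) + window + 1 < 0 ∧ PySem.Dict.get? pvCoinage p.1 = some (p.2.getD j "")))

instance (tokens_by_agent : List (String × List String)) (window : Int) : Decidable (D_build_coinage_contexts tokens_by_agent window) := by unfold D_build_coinage_contexts; infer_instance

def Spec_build_coinage_contexts (tokens_by_agent : List (String × List String)) (window : Int) (out : List (String × List String)) : Prop := ¬ D_build_coinage_contexts tokens_by_agent window → out = build_coinage_contexts_alt tokens_by_agent window
instance (tokens_by_agent : List (String × List String)) (window : Int) (out : List (String × List String)) : Decidable (Spec_build_coinage_contexts tokens_by_agent window out) := by unfold Spec_build_coinage_contexts; infer_instance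

def pvDiffWitness_build_coinage_contexts : (List (String × List String)) × Int :=
  ([("haiku", ["tidal-stretch", "a", "b", "c", "d", "e", "f", "g"])], -4)

def pvDiffWitnessOut_build_coinage_contexts : (List (String × List String)) × (List (String × List String)) :=
  ([("haiku", ["d"])], [("haiku", [])])

-- ===== CLAIM (what is proved, stated in full; the proofs are below) =====
def Claim_unchanged_build_coinage_contexts : Prop := ∀ (tokens_by_agent : List (String × List String)) (window : Int), Dom_build_coinage_contexts tokens_by_agent window → Pre_build_coinage_contexts tokens_by_agent window → Spec_build_coinage_contexts tokens_by_agent window (build_coinage_contexts tokens_by_agent window)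
def Claim_changed_build_coinage_contexts : Prop := Dom_build_coinage_contexts (pvDiffWitness_build_coinage_contexts.1) (pvDiffWitness_build_coinage_contexts.2) ∧ Pre_build_coinage_contexts (pvDiffWitness_build_coinage_contexts.1) (pvDiffWitness_build_coinage_contexts.2) ∧ D_build_coinage_contexts (pvDiffWitness_build_coinage_contexts.1) (pvDiffWitness_build_coinage_contexts.2) ∧ build_coinage_contexts (pvDiffWitness_build_coinage_contexts.1) (pvDiffWitness_build_coinage_contexts.2) = pvDiffWitnessOut_build_coinage_contexts.1 ∧ build_coinage_contexts_alt (pvDiffWitness_build_coinage_contexts.1) (pvDiffWitness_build_coinage_contexts.2) = pvDiffWitnessOut_build_coinage_contexts.2 ∧ pvDiffWitnessOut_build_coinage_contexts.1 ≠ pvDiffWitnessOut_build_coinage_contexts.2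

def Claim_exact_build_coinage_contexts : Prop := ∀ (tokens_by_agent : List (String × List String)) (window : Int), Dom_build_coinage_contexts tokens_by_agent window → Pre_build_coinage_contexts tokens_by_agent window → D_build_coinage_contexts tokens_by_agent window → build_coinage_contexts tokens_by_agent window ≠ build_coinage_contexts_alt tokens_by_agent window

-- ===== LEMMAS AND PROOFS =====

-- occurrence indices of the metaphor, ascending
def pvOccs (metaphor : String) (tokens : List String) : List Nat :=
  (List.range tokens.length).filter (fun j => tokens.getD j "" == metaphor)

-- the per-token covering predicate both programs compute (w ≥ 0 case), in Nat arithmetic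
def pvCov (w' : Nat) (ps : List Nat) (j : Nat) : Bool :=
  ps.any (fun i => decide (i ≤ j + w') && decide (j ≤ i + w'))

theorem pvLeft_acc (metaphor : String) (ts : List String) :
    ∀ (b : Int) (acc : List Int),
      (ts.foldl (fun (st : Int × List Int) tok =>
          let d := if tok == metaphor then 0 else st.1 + 1
          (d, st.2 ++ [d])) (b, acc)).2
      = acc ++ pvLeft metaphor b ts := by
  induction ts with
  | nil => intro b acc; simp [pvLeft]
  | cons t ts ih =>
    intro b acc
    simp only [pvLeft, List.foldl_cons]
    rw [ih, ih]
    simp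

theorem pvLeft_cons (metaphor : String) (b : Int) (t : String) (ts : List String) :
    pvLeft metaphor b (t :: ts)
      = (if t == metaphor then (0:Int) else b + 1) ::
        pvLeft metaphor (if t == metaphor then (0:Int) else b + 1) ts := by
  have h0 : pvLeft metaphor b (t :: ts)
      = (ts.foldl (fun (st : Int × List Int) tok =>
            let d := if tok == metaphor then 0 else st.1 + 1
            (d, st.2 ++ [d]))
          ((if t == metaphor then (0:Int) else b + 1),
           [if t == metaphor then (0:Int) else b + 1])).2 := rfl
  rw [h0, pvLeft_acc]
  simp

theorem pvLeft_length (metaphor : String) (b : Int) (ts : List String) :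
    (pvLeft metaphor b ts).length = ts.length := by
  induction ts generalizing b with
  | nil => simp [pvLeft]
  | cons t ts ih =>
    rw [pvLeft_cons]
    simp [ih]

theorem pvLeft_nonneg (metaphor : String) (ts : List String) :
    ∀ (b : Int), 0 ≤ b → ∀ j < ts.length, 0 ≤ (pvLeft metaphor b ts).getD j 0 := by
  induction ts with
  | nil => intro b _ j hj; simp at hj
  | cons t ts ih =>
    intro b hb j hj
    rw [pvLeft_cons]
    cases j with
    | zero => split_ifs <;> simp <;> omega
    | succ j' =>
      simp only [List.getD_cons_succ]
      apply ih
      · split_ifs <;> omega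
      · simpa using hj

-- exact bracket for the forward sweep, any b and any k ≥ 0
theorem pvLeft_le_iff (metaphor : String) (ts : List String) :
    ∀ (b k : Int), 0 ≤ k → ∀ j < ts.length,
      ((pvLeft metaphor b ts).getD j 0 ≤ k ↔
        (b + j + 1 ≤ k ∧ ∀ i ≤ j, ¬ ts.getD i "" = metaphor) ∨
        ∃ i ≤ j, ts.getD i "" = metaphor ∧ (j : Int) - i ≤ k) := by
  induction ts with
  | nil => intro b k hk j hj; simp at hj
  | cons t ts ih =>
    intro b k hk j hj
    rw [pvLeft_cons]
    by_cases ht : (t == metaphor) = true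
    · have ht' : t = metaphor := by simpa using ht
      simp only [ht, if_true]
      cases j with
      | zero =>
        simp only [List.getD_cons_zero]
        constructor
        · intro _
          right
          exact ⟨0, Nat.le_refl 0, ht', by push_cast; omega⟩
        · intro _
          exact hk
      | succ j' =>
        have hj' : j' < ts.length := by simpa using hj
        simp only [List.getD_cons_succ]
        rw [ih 0 k hk j' hj']
        constructor
        · rintro (⟨h1, _⟩ | ⟨i, hij, hocc, hdist⟩)
          · right
            exact ⟨0, by omega, by simpa using ht', by push_cast at h1 ⊢; omega⟩
          · right
            refine ⟨i + 1, by omega, ?_, ?_⟩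
            · simpa using hocc
            · push_cast at hdist ⊢; omega
        · rintro (⟨h1, h2⟩ | ⟨i, hij, hocc, hdist⟩)
          · exact absurd (show (t :: ts).getD 0 "" = metaphor by simpa using ht') (h2 0 (by omega))
          · cases i with
            | zero =>
              by_cases hex : ∃ i ≤ j', ts.getD i "" = metaphor
              · obtain ⟨i, hi1, hi2⟩ := hex
                right
                exact ⟨i, hi1, hi2, by push_cast at hdist ⊢; omega⟩
              · left
                refine ⟨by push_cast at hdist ⊢; omega, ?_⟩
                intro i hi hocc2
                exact hex ⟨i, hi, hocc2⟩
            | succ i' =>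
              right
              exact ⟨i', by omega, by simpa using hocc, by push_cast at hdist ⊢; omega⟩
    · have ht' : ¬ t = metaphor := by simpa using ht
      rw [Bool.not_eq_true] at ht
      simp only [ht, Bool.false_eq_true, if_false]
      cases j with
      | zero =>
        simp only [List.getD_cons_zero]
        constructor
        · intro h
          left
          refine ⟨by push_cast; omega, ?_⟩
          intro i hi
          have : i = 0 := by omega
          subst this
          simpa using ht'
        · rintro (⟨h1, _⟩ | ⟨i, hi, hocc, _⟩)
          · push_cast at h1; omega
          · have : i = 0 := by omega
            subst this
            exact absurd (by simpa using hocc) ht'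
      | succ j' =>
        have hj' : j' < ts.length := by simpa using hj
        simp only [List.getD_cons_succ]
        rw [ih (b + 1) k hk j' hj']
        constructor
        · rintro (⟨h1, h2⟩ | ⟨i, hij, hocc, hdist⟩)
          · left
            refine ⟨by push_cast at h1 ⊢; omega, ?_⟩
            intro i hi
            cases i with
            | zero => simpa using ht'
            | succ i' => simpa using h2 i' (by omega)
          · right
            refine ⟨i + 1, by omega, by simpa using hocc, by push_cast at hdist ⊢; omega⟩
        · rintro (⟨h1, h2⟩ | ⟨i, hij, hocc, hdist⟩)
          · left
            refine ⟨by push_cast at h1 ⊢; omega, ?_⟩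
            intro i hi
            exact h2 (i + 1) (by omega)
          · cases i with
            | zero => exact absurd (by simpa using hocc) ht'
            | succ i' =>
              right
              exact ⟨i', by omega, by simpa using hocc, by push_cast at hdist ⊢; omega⟩

theorem pvRight_acc (metaphor : String) (l : List String) :
    ∀ (b : Int) (acc : List Int),
      (l.foldl (fun (st : Int × List Int) tok =>
          let d := if tok == metaphor then 0 else st.1 + 1
          (d, d :: st.2)) (b, acc)).2
      = (pvLeft metaphor b l).reverse ++ acc := by
  induction l with
  | nil => intro b acc; simp [pvLeft]
  | cons t l ih =>
    intro b acc
    have h0 : ((t :: l).foldl (fun (st : Int × List Int) tok =>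
          let d := if tok == metaphor then 0 else st.1 + 1
          (d, d :: st.2)) (b, acc)).2
        = (l.foldl (fun (st : Int × List Int) tok =>
            let d := if tok == metaphor then 0 else st.1 + 1
            (d, d :: st.2))
          ((if t == metaphor then (0:Int) else b + 1),
           (if t == metaphor then (0:Int) else b + 1) :: acc)).2 := rfl
    rw [h0, ih, pvLeft_cons]
    simp

theorem pvRight_eq_reverse (metaphor : String) (b : Int) (ts : List String) :
    pvRight metaphor b ts = (pvLeft metaphor b ts.reverse).reverse := by
  rw [pvRight, pvRight_acc]
  simp

theorem pvFilter_split {P Q : Nat → Bool} :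
    ∀ (l : List Nat), l.Pairwise (· < ·) →
      (∀ x ∈ l, ∀ y ∈ l, P x = true → Q y = true → P y = false → x < y) →
      l.filter (fun j => P j || Q j) = l.filter P ++ l.filter (fun j => Q j && !P j) := by
  intro l
  induction l with
  | nil => intro _ _; simp
  | cons x l ih =>
    intro hpw hsep
    rw [List.pairwise_cons] at hpw
    have hsep' : ∀ a ∈ l, ∀ b ∈ l, P a = true → Q b = true → P b = false → a < b := by
      intro a ha b hb
      exact hsep a (List.mem_cons_of_mem _ ha) b (List.mem_cons_of_mem _ hb)
    simp only [List.filter_cons]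
    by_cases hP : P x = true
    · simp only [hP, Bool.true_or, if_true, Bool.not_true, Bool.and_false,
        Bool.false_eq_true, if_false]
      rw [ih hpw.2 hsep']
      simp
    · rw [Bool.not_eq_true] at hP
      by_cases hQ : Q x = true
      · have hnoP : ∀ y ∈ l, P y = false := by
          intro y hy
          by_contra hPy
          rw [Bool.not_eq_false] at hPy
          have hlt := hsep y (List.mem_cons_of_mem _ hy) x (List.mem_cons_self) hPy hQ hP
          have := hpw.1 y hy
          omega
        have h1 : l.filter (fun j => P j || Q j) = l.filter (fun j => Q j && !P j) := by
          apply List.filter_congr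
          intro y hy
          simp [hnoP y hy]
        have h2 : l.filter P = [] := by
          rw [List.filter_eq_nil_iff]
          intro y hy
          simp [hnoP y hy]
        simp only [hP, hQ, Bool.false_or, if_true, Bool.not_false, Bool.and_true,
          Bool.false_eq_true, if_false, h1, h2]
        simp
      · rw [Bool.not_eq_true] at hQ
        simp only [hP, hQ, Bool.false_or, Bool.false_and, Bool.false_eq_true, if_false]
        exact ih hpw.2 hsep'

theorem pvUpdate_of_subset {s : PySem.Set String} :
    ∀ (xs : List String), (∀ x ∈ xs, x ∈ s) → PySem.Set.update s xs = s := by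
  intro xs
  induction xs with
  | nil => intro _; rfl
  | cons x xs ih =>
    intro h
    rw [PySem.Set.update_cons, PySem.Set.add_of_mem (h x (List.mem_cons_self))]
    exact ih (fun y hy => h y (List.mem_cons_of_mem _ hy))

theorem pvDropTake_eq_map_range' (xs : List String) (s len : Nat) (h : s + len ≤ xs.length) :
    (xs.drop s).take len = (List.range' s len).map (fun j => xs.getD j "") := by
  apply List.ext_getElem
  · simp; omega
  · intro i h1 h2
    have hlen : i < len := by simpa using h2
    have hsx : s + i < xs.length := by omega
    simp only [List.getElem_take, List.getElem_drop, List.getElem_map, List.getElem_range']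
    have : s + 1 * i = s + i := by omega
    rw [this, List.getD_eq_getElem _ _ hsx]

-- A's per-position slice, w ≥ 0, position i < n: the tokens at indices [i-w', min n (i+w'+1))
theorem pvSliceA_eq (toks : List String) (w : Int) (hw : 0 ≤ w) (i : Nat) (hi : i < toks.length) :
    PySem.List.slice toks (some (max 0 ((i : Int) - w)))
        (some (min (toks.length : Int) ((i : Int) + w + 1)))
      = (List.range' (i - w.toNat) (min toks.length (i + w.toNat + 1) - (i - w.toNat))).map
          (fun j => toks.getD j "") := by
  have h1 : max 0 ((i : Int) - w) = ((i - w.toNat : Nat) : Int) := by omega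
  have h2 : min ((toks.length : Int)) ((i : Int) + w + 1)
      = ((min toks.length (i + w.toNat + 1) : Nat) : Int) := by omega
  rw [h1, h2, PySem.List.slice_natCast,
    pvDropTake_eq_map_range' _ _ _ (by omega)]

-- A's per-position slice is empty for w < 0 when no wraparound happens at this position
theorem pvSliceA_neg_empty (toks : List String) (w : Int) (hw : w < 0) (i : Nat)
    (hnw : (i : Int) + w + 1 < 0 → (toks.length : Int) + 2 * w + 1 ≤ 0) :
    PySem.List.slice toks (some (max 0 ((i : Int) - w)))
        (some (min (toks.length : Int) ((i : Int) + w + 1))) = [] := by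
  rcases lt_or_ge ((i : Int) + w + 1) 0 with hneg | hpos
  · have hlen := hnw hneg
    rw [PySem.List.slice]
    simp only [PySem.List.clampIdx]
    split_ifs <;> (rw [List.take_eq_nil_iff]; left; omega)
  · rw [PySem.List.slice]
    simp only [PySem.List.clampIdx]
    split_ifs <;> (rw [List.take_eq_nil_iff]; left; omega)

-- the interval-union induction: folding slice-updates over ascending positions builds the
-- covered tokens in index-ascending first-occurrence order
theorem pvRevGetD (toks : List String) (i : Nat) (hi : i < toks.length) :
    toks.reverse.getD i "" = toks.getD (toks.length - 1 - i) "" := by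
  rw [List.getD_eq_getElem _ _ (by simpa using (by omega : i < toks.length)),
      List.getD_eq_getElem _ _ (by omega)]
  rw [List.getElem_reverse]

theorem pvCtxA_eq_ofList (toks : List String) (w' : Nat) :
    ∀ (ps : List Nat), ps.Pairwise (· < ·) → (∀ i ∈ ps, i < toks.length) →
      ps.foldl (fun s i =>
          PySem.Set.update s
            ((List.range' (i - w') (min toks.length (i + w' + 1) - (i - w'))).map
              (fun j => toks.getD j ""))) PySem.Set.empty
        = PySem.Set.ofList
            (((List.range toks.length).filter (pvCov w' ps)).map (fun j => toks.getD j "")) := by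
  intro ps
  induction ps using List.reverseRecOn with
  | nil =>
    intro _ _
    have h0 : (List.range toks.length).filter (pvCov w' []) = [] :=
      List.filter_eq_nil_iff.mpr (fun j _ => by simp [pvCov])
    simp [h0, PySem.Set.empty]
  | append_singleton qs p ih =>
    intro hpw hbnd
    have hqp : ∀ q ∈ qs, q < p := by
      rw [List.pairwise_append] at hpw
      intro q hq
      exact hpw.2.2 q hq p (List.mem_cons_self)
    have hp : p < toks.length := hbnd p (by simp)
    have hpwq : qs.Pairwise (· < ·) := (List.pairwise_append.mp hpw).1
    have hbq : ∀ i ∈ qs, i < toks.length := fun i hi => hbnd i (by simp [hi])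
    rw [List.foldl_append, ih hpwq hbq]
    simp only [List.foldl_cons, List.foldl_nil]
    set n := toks.length with hn
    set covQ := pvCov w' qs with hcovQ
    set covP : Nat → Bool := fun j => decide (p ≤ j + w') && decide (j ≤ p + w') with hcovP
    have hcov_append : ∀ j, pvCov w' (qs ++ [p]) j = (covQ j || covP j) := by
      intro j
      simp [pvCov, List.any_append, hcovP, hcovQ]
    have hsepMain : ∀ x, covQ x = true → ∀ y, p ≤ y + w' → covQ y = false → x < y := by
      intro x hx y hy1 hyn
      rw [hcovQ, pvCov, List.any_eq_true] at hx
      obtain ⟨q, hqmem, hq⟩ := hx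
      simp only [Bool.and_eq_true, decide_eq_true_eq] at hq
      by_contra hxy
      push_neg at hxy
      have hyq : covQ y = true := by
        rw [hcovQ, pvCov, List.any_eq_true]
        refine ⟨q, hqmem, ?_⟩
        simp only [Bool.and_eq_true, decide_eq_true_eq]
        have := hqp q hqmem
        omega
      rw [hyn] at hyq
      cases hyq
    have h1 : (List.range n).filter (fun j => covQ j || covP j)
        = (List.range n).filter covQ ++ (List.range n).filter (fun j => covP j && !covQ j) := by
      apply pvFilter_split (List.range n) List.pairwise_lt_range
      intro x _ y _ hPx hQy hPy
      simp only [hcovP, Bool.and_eq_true, decide_eq_true_eq] at hQy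
      exact hsepMain x hPx y hQy.1 hPy
    set s := p - w' with hs
    set e := min n (p + w' + 1) with he
    set idx := List.range' s (e - s) with hidx
    have hse : s ≤ e := by omega
    have hen : e ≤ n := by omega
    have h2 : (List.range n).filter (fun j => covP j && !covQ j) = idx.filter (fun j => !covQ j) := by
      have hrange : List.range n = (List.range' 0 s ++ idx) ++ List.range' e (n - e) := by
        rw [hidx, List.range_eq_range']
        have e1 := List.range'_append (s := 0) (m := s) (n := e - s) (step := 1)
        rw [show (0 + 1 * s) = s from by omega, show s + (e - s) = e from by omega] at e1
        have e2 := List.range'_append (s := 0) (m := e) (n := n - e) (step := 1)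
        rw [show (0 + 1 * e) = e from by omega, show e + (n - e) = n from by omega] at e2
        rw [← e2, ← e1]
      rw [hrange, List.filter_append, List.filter_append]
      have hfirst : (List.range' 0 s).filter (fun j => covP j && !covQ j) = [] := by
        rw [List.filter_eq_nil_iff]
        intro j hj
        rw [List.mem_range'_1] at hj
        have hnp : ¬ (p ≤ j + w') := by omega
        simp [hcovP, hnp]
      have hlast : (List.range' e (n - e)).filter (fun j => covP j && !covQ j) = [] := by
        rw [List.filter_eq_nil_iff]
        intro j hj
        rw [List.mem_range'_1] at hj
        have hnp : ¬ (j ≤ p + w') := by omega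
        simp [hcovP, hnp]
      have hmid : idx.filter (fun j => covP j && !covQ j) = idx.filter (fun j => !covQ j) := by
        apply List.filter_congr
        intro j hj
        rw [hidx, List.mem_range'_1] at hj
        have h3 : covP j = true := by
          simp only [hcovP, Bool.and_eq_true, decide_eq_true_eq]
          omega
        rw [h3, Bool.true_and]
      simp [hfirst, hlast, hmid]
    have h3 : idx = idx.filter covQ ++ idx.filter (fun j => !covQ j) := by
      have hsplit := pvFilter_split (P := covQ) (Q := fun _ => true) idx
        (List.pairwise_lt_range' 1)
        (by
          intro x hx y hy hPx _ hPy
          apply hsepMain x hPx y ?_ hPy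
          rw [hidx, List.mem_range'_1] at hy
          omega)
      simp only [Bool.or_true, Bool.true_and] at hsplit
      rw [List.filter_true] at hsplit
      exact hsplit
    have h4 : PySem.Set.update
        (PySem.Set.ofList (((List.range n).filter covQ).map (fun j => toks.getD j "")))
        ((idx.filter covQ).map (fun j => toks.getD j ""))
        = PySem.Set.ofList (((List.range n).filter covQ).map (fun j => toks.getD j "")) := by
      apply pvUpdate_of_subset
      intro x hx
      rw [List.mem_map] at hx
      obtain ⟨j, hj, rfl⟩ := hx
      rw [List.mem_filter] at hj
      have hjidx := hj.1
      rw [hidx, List.mem_range'_1] at hjidx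
      rw [PySem.Set.mem_ofList]
      apply List.mem_map_of_mem
      rw [List.mem_filter]
      exact ⟨by rw [List.mem_range]; omega, hj.2⟩
    have hcongrP : (List.range n).filter (pvCov w' (qs ++ [p]))
        = (List.range n).filter (fun j => covQ j || covP j) :=
      List.filter_congr (fun j _ => hcov_append j)
    rw [hcongrP, h1, List.map_append, PySem.Set.ofList_append]
    rw [show idx.map (fun j => toks.getD j "")
        = (idx.filter covQ).map (fun j => toks.getD j "")
          ++ (idx.filter (fun j => !covQ j)).map (fun j => toks.getD j "") from by
      rw [← List.map_append, ← h3]]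
    rw [PySem.Set.update_append, h4, h2]

-- B's filter agrees with the covering predicate over the occurrence list
theorem pvFilterB_eq (toks : List String) (metaphor : String) (w : Int)
    (hmem : metaphor ∈ toks) :
    (List.range toks.length).filter
        (fun j => decide (min ((pvLeft metaphor ((toks.length : Int) + 1) toks).getD j 0)
            ((pvRight metaphor ((toks.length : Int) + 1) toks).getD j 0) ≤ w))
      = if w < 0 then []
        else (List.range toks.length).filter (pvCov w.toNat (pvOccs metaphor toks)) := by
  set n := toks.length with hn
  set big : Int := (n : Int) + 1 with hbig
  obtain ⟨i0, hi0, hocc0⟩ : ∃ i0, i0 < n ∧ toks.getD i0 "" = metaphor := by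
    obtain ⟨k, hk, hkeq⟩ := List.mem_iff_getElem.mp hmem
    exact ⟨k, hk, by rw [List.getD_eq_getElem _ _ hk, hkeq]⟩
  have hRlen : (pvLeft metaphor big toks.reverse).length = n := by
    rw [pvLeft_length]; simp [hn]
  have hRight : ∀ j < n, (pvRight metaphor big toks).getD j 0
      = (pvLeft metaphor big toks.reverse).getD (n - 1 - j) 0 := by
    intro j hj
    rw [pvRight_eq_reverse]
    rw [List.getD_eq_getElem _ _ (by simp only [List.length_reverse, hRlen]; omega),
        List.getD_eq_getElem _ _ (by rw [hRlen]; omega)]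
    rw [List.getElem_reverse]
    congr 1
    rw [hRlen]
  by_cases hwneg : w < 0
  · rw [if_pos hwneg, List.filter_eq_nil_iff]
    intro j hj
    rw [List.mem_range] at hj
    have hL := pvLeft_nonneg metaphor toks big (by omega) j (by rw [← hn]; exact hj)
    have hR : 0 ≤ (pvRight metaphor big toks).getD j 0 := by
      rw [hRight j hj]
      exact pvLeft_nonneg metaphor toks.reverse big (by omega) (n - 1 - j)
        (by rw [List.length_reverse]; omega)
    simp only [decide_eq_true_eq]
    omega
  · rw [if_neg hwneg]
    push_neg at hwneg
    apply List.filter_congr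
    intro j hjmem
    rw [List.mem_range] at hjmem
    rw [Bool.eq_iff_iff]
    simp only [decide_eq_true_eq]
    rw [hRight j hjmem, min_le_iff,
        pvLeft_le_iff metaphor toks big w hwneg j (by rw [← hn]; exact hjmem),
        pvLeft_le_iff metaphor toks.reverse big w hwneg (n - 1 - j)
          (by rw [List.length_reverse]; omega)]
    rw [pvCov, List.any_eq_true]
    have hoccsmem : ∀ i, i ∈ pvOccs metaphor toks ↔ (i < n ∧ toks.getD i "" = metaphor) := by
      intro i
      rw [pvOccs, List.mem_filter, List.mem_range]
      simp [hn]
    have hrevD : ∀ i < n, toks.reverse.getD i "" = toks.getD (n - 1 - i) "" := by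
      intro i hi
      rw [pvRevGetD toks i (by rw [← hn]; exact hi), ← hn]
    constructor
    · rintro (h | h)
      · rcases h with ⟨hsp, _⟩ | ⟨i, hij, hocc, hdist⟩
        · refine ⟨i0, (hoccsmem i0).mpr ⟨hi0, hocc0⟩, ?_⟩
          simp only [Bool.and_eq_true, decide_eq_true_eq]
          omega
        · refine ⟨i, (hoccsmem i).mpr ⟨by omega, hocc⟩, ?_⟩
          simp only [Bool.and_eq_true, decide_eq_true_eq]
          omega
      · rcases h with ⟨hsp, _⟩ | ⟨i', hij', hocc', hdist'⟩
        · refine ⟨i0, (hoccsmem i0).mpr ⟨hi0, hocc0⟩, ?_⟩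
          simp only [Bool.and_eq_true, decide_eq_true_eq]
          omega
        · have hi'n : i' < n := by omega
          rw [hrevD i' hi'n] at hocc'
          refine ⟨n - 1 - i', (hoccsmem _).mpr ⟨by omega, hocc'⟩, ?_⟩
          simp only [Bool.and_eq_true, decide_eq_true_eq]
          omega
    · rintro ⟨i, himem, hcond⟩
      rw [hoccsmem i] at himem
      simp only [Bool.and_eq_true, decide_eq_true_eq] at hcond
      obtain ⟨hin, hocci⟩ := himem
      by_cases hij : i ≤ j
      · exact Or.inl (Or.inr ⟨i, hij, hocci, by omega⟩)
      · refine Or.inr (Or.inr ⟨n - 1 - i, by omega, ?_, by omega⟩)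
        rw [hrevD (n - 1 - i) (by omega)]
        rw [show n - 1 - (n - 1 - i) = i from by omega]
        exact hocci

-- A's positions list is the occurrence list, cast to Int
theorem pvOccs_cons (met t : String) (ts : List String) :
    pvOccs met (t :: ts)
      = (if (t == met) = true then [0] else []) ++ (pvOccs met ts).map Nat.succ := by
  unfold pvOccs
  rw [List.length_cons, List.range_succ_eq_map, List.filter_cons, List.filter_map]
  have hcomp : ((fun j => ((t :: ts).getD j "" == met)) ∘ Nat.succ)
      = (fun j => (ts.getD j "" == met)) := by
    funext j; simp
  rw [hcomp]
  by_cases h : (t == met) = true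
  · simp [h]
  · rw [Bool.not_eq_true] at h
    simp [h]

theorem pvEnumFilter (met : String) :
    ∀ (ts : List String) (s : Int),
      ((PySem.List.enumerate ts s).filter (fun q => q.2 == met)).map (·.1)
        = (pvOccs met ts).map (fun (i : Nat) => s + (i : Int)) := by
  intro ts
  induction ts with
  | nil => intro s; simp [PySem.List.enumerate, pvOccs]
  | cons t ts ih =>
    intro s
    rw [show PySem.List.enumerate (t :: ts) s = (s, t) :: PySem.List.enumerate ts (s + 1) from rfl]
    rw [List.filter_cons, pvOccs_cons]
    by_cases h : (t == met) = true
    · simp only [h, if_true, List.map_cons, List.map_append, List.map_map,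
        List.singleton_append, ih (s + 1)]
      congr 1
      · simp
      · apply List.map_congr_left
        intro i _
        simp only [Function.comp_apply]
        push_cast
        ring
    · rw [Bool.not_eq_true] at h
      simp only [h, Bool.false_eq_true, if_false, List.nil_append, ih (s + 1), List.map_map]
      apply List.map_congr_left
      intro i _
      simp only [Function.comp_apply]
      push_cast
      ring

theorem pvPositions_eq (toks : List String) (metaphor : String) :
    (PySem.List.enumerate toks 0).foldl
        (fun acc q => if q.2 == metaphor then acc ++ [q.1] else acc) []
      = (pvOccs metaphor toks).map (fun (i : Nat) => (i : Int)) := by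
  rw [PySem.List.foldl_append_if (fun q : Int × String => q.2 == metaphor) (fun q => q.1)]
  rw [List.nil_append]
  rw [show ((PySem.List.enumerate toks 0).filter (fun q => q.2 == metaphor)).map (fun q => q.1)
      = ((PySem.List.enumerate toks 0).filter (fun q => q.2 == metaphor)).map (·.1) from rfl]
  rw [pvEnumFilter metaphor toks 0]
  apply List.map_congr_left
  intro i _
  omega

-- per-agent: the two context sets coincide (outside the wraparound region)
theorem pvCtx_eq (toks : List String) (metaphor : String) (w : Int)
    (hmem : metaphor ∈ toks)
    (hnw : ¬ (w < 0 ∧ (toks.length : Int) + 2 * w + 1 > 0 ∧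
        ∃ j ∈ List.range toks.length, ((j : Int) + w + 1 < 0 ∧ toks.getD j "" = metaphor))) :
    pvCtxA toks w ((pvOccs metaphor toks).map (fun (i : Nat) => (i : Int)))
      = PySem.Set.ofList
          (((List.range toks.length).filter
              (fun j => decide (min ((pvLeft metaphor ((toks.length : Int) + 1) toks).getD j 0)
                  ((pvRight metaphor ((toks.length : Int) + 1) toks).getD j 0) ≤ w))).map
            (fun j => toks.getD j "")) := by
  rw [pvFilterB_eq toks metaphor w hmem]
  by_cases hwneg : w < 0
  · rw [if_pos hwneg]
    rw [pvCtxA, PySem.List.foldl_congr_mem _ _ (fun (ctx : PySem.Set String) (_ : Int) => ctx)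
      PySem.Set.empty ?hcong]
    · rw [PySem.List.foldl_ignore]
      simp [PySem.Set.empty]
    case hcong =>
      intro acc x hx
      rw [List.mem_map] at hx
      obtain ⟨i, hiocc, rfl⟩ := hx
      rw [pvOccs, List.mem_filter, List.mem_range] at hiocc
      have hempty : PySem.List.slice toks (some (max 0 ((i : Int) - w)))
          (some (min (toks.length : Int) ((i : Int) + w + 1))) = [] := by
        apply pvSliceA_neg_empty toks w hwneg i
        intro hneg
        by_contra hgt
        push_neg at hgt
        refine hnw ⟨hwneg, by omega, i, ?_, hneg, ?_⟩
        · rw [List.mem_range]; exact hiocc.1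
        · simpa using hiocc.2
      rw [hempty, PySem.Set.update_nil]
  · rw [if_neg hwneg]
    push_neg at hwneg
    have hA : pvCtxA toks w ((pvOccs metaphor toks).map (fun (i : Nat) => (i : Int)))
        = (pvOccs metaphor toks).foldl (fun s i =>
            PySem.Set.update s
              ((List.range' (i - w.toNat) (min toks.length (i + w.toNat + 1) - (i - w.toNat))).map
                (fun j => toks.getD j ""))) PySem.Set.empty := by
      rw [pvCtxA, List.foldl_map]
      apply PySem.List.foldl_congr_mem
      intro acc i hi
      rw [pvOccs, List.mem_filter, List.mem_range] at hi
      rw [pvSliceA_eq toks w hwneg i hi.1]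
    rw [hA, pvCtxA_eq_ofList toks w.toNat (pvOccs metaphor toks)
      (List.Pairwise.filter _ List.pairwise_lt_range)
      (fun i hi => by rw [pvOccs, List.mem_filter, List.mem_range] at hi; exact hi.1)]

-- per-agent steps agree
theorem pvStep_eq (w : Int) (c : PySem.Dict String (PySem.Set String)) (p : String × List String)
    (hpre : (match PySem.Dict.get? pvCoinage p.1 with
             | none => false
             | some metaphor => p.2.contains metaphor) = true)
    (hnw : ¬ (w < 0 ∧ ((p.2.length : Int) + 2 * w + 1 > 0 ∧
        ∃ j ∈ List.range p.2.length,
          ((j : Int) + w + 1 < 0 ∧ PySem.Dict.get? pvCoinage p.1 = some (p.2.getD j ""))))) :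
    pvStepA w c p = pvStepB w c p := by
  unfold pvStepA pvStepB
  cases hm : PySem.Dict.get? pvCoinage p.1 with
  | none => rfl
  | some metaphor =>
    rw [hm] at hpre
    simp only at hpre
    have hmem : metaphor ∈ p.2 := List.contains_iff_mem.mp hpre
    simp only
    rw [pvPositions_eq p.2 metaphor]
    have hoccs_ne : pvOccs metaphor p.2 ≠ [] := by
      obtain ⟨k, hk, hkeq⟩ := List.mem_iff_getElem.mp hmem
      intro hNil
      have hkmem : k ∈ pvOccs metaphor p.2 := by
        rw [pvOccs, List.mem_filter, List.mem_range]
        exact ⟨hk, by rw [List.getD_eq_getElem _ _ hk, hkeq]; simp⟩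
      rw [hNil] at hkmem
      simp at hkmem
    rw [if_neg (by simpa using hoccs_ne), if_neg (by rw [hpre]; simp)]
    congr 1
    apply pvCtx_eq p.2 metaphor w hmem
    intro hD
    apply hnw
    obtain ⟨hwneg, hlen, j, hjmem, hjneg, hocc⟩ := hD
    exact ⟨hwneg, hlen, j, hjmem, hjneg, by rw [hm, hocc]⟩

theorem pvSet_update_ne_nil {s : PySem.Set String} (hs : s ≠ []) :
    ∀ (l : List String), PySem.Set.update s l ≠ [] := by
  intro l
  induction l generalizing s with
  | nil => rw [PySem.Set.update_nil]; exact hs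
  | cons x l ih =>
    rw [PySem.Set.update_cons]
    apply ih
    rw [PySem.Set.add_eq_ite]
    split_ifs with h
    · exact hs
    · simp

theorem pvSet_update_cons_ne_nil (s : PySem.Set String) (x : String) (l : List String) :
    PySem.Set.update s (x :: l) ≠ [] := by
  rw [PySem.Set.update_cons]
  apply pvSet_update_ne_nil
  rw [PySem.Set.add_eq_ite]
  split_ifs with h
  · exact List.ne_nil_of_mem h
  · simp

theorem pvFoldUpd_ne (g : Int → List String) :
    ∀ (ps : List Int) (s : PySem.Set String),
      (s ≠ [] ∨ ∃ i ∈ ps, g i ≠ []) →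
      ps.foldl (fun s i => PySem.Set.update s (g i)) s ≠ [] := by
  intro ps
  induction ps with
  | nil =>
    intro s h
    rcases h with h | ⟨i, hi, _⟩
    · exact h
    · simp at hi
  | cons i ps ih =>
    intro s h
    rw [List.foldl_cons]
    rcases h with h | ⟨i', hi', hg⟩
    · exact ih _ (Or.inl (pvSet_update_ne_nil h (g i)))
    · rcases List.mem_cons.mp hi' with rfl | hmem
      · cases hgi : g i' with
        | nil => exact absurd hgi hg
        | cons x l =>
          exact ih _ (Or.inl (pvSet_update_cons_ne_nil s x l))
      · by_cases hs : PySem.Set.update s (g i) = []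
        · rw [hs]
          exact ih _ (Or.inr ⟨i', hmem, hg⟩)
        · exact ih _ (Or.inl hs)

theorem pvSliceWrap_ne (toks : List String) (w : Int) (j : Nat) (hw : w < 0)
    (hjn : j < toks.length) (hneg : (j : Int) + w + 1 < 0)
    (hlen : (toks.length : Int) + 2 * w + 1 > 0) :
    PySem.List.slice toks (some (max 0 ((j : Int) - w)))
        (some (min (toks.length : Int) ((j : Int) + w + 1))) ≠ [] := by
  rw [PySem.List.slice]
  simp only [PySem.List.clampIdx]
  split_ifs <;>
    (apply List.ne_nil_of_length_pos; rw [List.length_take, List.length_drop]; omega)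

theorem pvStepA_get_ne (w : Int) (d : PySem.Dict String (PySem.Set String))
    (q : String × List String) (k : String) (hk : k ≠ q.1) :
    (pvStepA w d q).get? k = d.get? k := by
  unfold pvStepA
  cases PySem.Dict.get? pvCoinage q.1 with
  | none => rfl
  | some met =>
    simp only
    split_ifs with h
    · rfl
    · exact PySem.Dict.get?_insert_of_ne d _ hk

theorem pvStepB_get_ne (w : Int) (d : PySem.Dict String (PySem.Set String))
    (q : String × List String) (k : String) (hk : k ≠ q.1) :
    (pvStepB w d q).get? k = d.get? k := by
  unfold pvStepB
  cases PySem.Dict.get? pvCoinage q.1 with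
  | none => rfl
  | some met =>
    simp only
    split_ifs with h
    · rfl
    · exact PySem.Dict.get?_insert_of_ne d _ hk

theorem pvFold_get_ne (w : Int)
    (step : Int → PySem.Dict String (PySem.Set String) → (String × List String) → PySem.Dict String (PySem.Set String))
    (hstep : ∀ (d : PySem.Dict String (PySem.Set String)) (q : String × List String) (k : String),
      k ≠ q.1 → (step w d q).get? k = d.get? k) :
    ∀ (l : List (String × List String)) (d : PySem.Dict String (PySem.Set String)) (k : String),
      (∀ q ∈ l, q.1 ≠ k) → (l.foldl (step w) d).get? k = d.get? k := by
  intro l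
  induction l with
  | nil => intro d k _; rfl
  | cons q l ih =>
    intro d k h
    rw [List.foldl_cons, ih _ k (fun q' hq' => h q' (List.mem_cons_of_mem _ hq')),
      hstep d q k (fun he => h q (List.mem_cons_self) he.symm)]

theorem pvFoldA_get (w : Int) (met : String) :
    ∀ (l : List (String × List String)) (d : PySem.Dict String (PySem.Set String))
      (p : String × List String), p ∈ l → (l.map (·.1)).Nodup →
      PySem.Dict.get? pvCoinage p.1 = some met → met ∈ p.2 →
      (l.foldl (pvStepA w) d).get? p.1
        = some (pvCtxA p.2 w ((pvOccs met p.2).map (fun (i : Nat) => (i : Int)))) := by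
  intro l
  induction l with
  | nil => intro d p hp; simp at hp
  | cons q l ih =>
    intro d p hp hnd hreg hmm
    rw [List.map_cons, List.nodup_cons] at hnd
    rcases List.mem_cons.mp hp with rfl | hmem
    · rw [List.foldl_cons]
      rw [pvFold_get_ne w pvStepA (pvStepA_get_ne w) l _ p.1
        (fun q' hq' he => hnd.1 (he ▸ List.mem_map_of_mem hq'))]
      unfold pvStepA
      rw [hreg]
      simp only
      rw [pvPositions_eq p.2 met]
      have hocc_ne : pvOccs met p.2 ≠ [] := by
        obtain ⟨k, hk, hkeq⟩ := List.mem_iff_getElem.mp hmm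
        intro hNil
        have hkm : k ∈ pvOccs met p.2 := by
          rw [pvOccs, List.mem_filter, List.mem_range]
          exact ⟨hk, by rw [List.getD_eq_getElem _ _ hk, hkeq]; simp⟩
        rw [hNil] at hkm
        simp at hkm
      rw [if_neg (by simpa using hocc_ne)]
      exact PySem.Dict.get?_insert_self d _ _
    · rw [List.foldl_cons]
      exact ih _ p hmem hnd.2 hreg hmm

theorem pvFoldB_get (w : Int) (met : String) :
    ∀ (l : List (String × List String)) (d : PySem.Dict String (PySem.Set String))
      (p : String × List String), p ∈ l → (l.map (·.1)).Nodup →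
      PySem.Dict.get? pvCoinage p.1 = some met → met ∈ p.2 →
      (l.foldl (pvStepB w) d).get? p.1
        = some (PySem.Set.ofList
            (((List.range p.2.length).filter
                (fun j => decide (min ((pvLeft met ((p.2.length : Int) + 1) p.2).getD j 0)
                    ((pvRight met ((p.2.length : Int) + 1) p.2).getD j 0) ≤ w))).map
              (fun j => p.2.getD j ""))) := by
  intro l
  induction l with
  | nil => intro d p hp; simp at hp
  | cons q l ih =>
    intro d p hp hnd hreg hmm
    rw [List.map_cons, List.nodup_cons] at hnd
    rcases List.mem_cons.mp hp with rfl | hmem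
    · rw [List.foldl_cons]
      rw [pvFold_get_ne w pvStepB (pvStepB_get_ne w) l _ p.1
        (fun q' hq' he => hnd.1 (he ▸ List.mem_map_of_mem hq'))]
      unfold pvStepB
      rw [hreg]
      simp only
      rw [if_neg (by rw [(List.contains_iff_mem).mpr hmm]; simp)]
      exact PySem.Dict.get?_insert_self d _ _
    · rw [List.foldl_cons]
      exact ih _ p hmem hnd.2 hreg hmm

-- ===== VERDICT (by name: the statements are the Claim_ definitions above) =====
theorem build_coinage_contexts_spec : Claim_unchanged_build_coinage_contexts := by
  intro tba w _ hpre
  unfold Spec_build_coinage_contexts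
  intro hnd
  obtain ⟨_, hall⟩ := hpre
  unfold build_coinage_contexts build_coinage_contexts_alt
  congr 1
  apply PySem.List.foldl_congr_mem
  intro acc p hp
  apply pvStep_eq
  · rw [List.all_eq_true] at hall
    exact hall p hp
  · intro hper
    apply hnd
    unfold D_build_coinage_contexts
    exact ⟨hper.1, p, hp, hper.2⟩

theorem build_coinage_contexts_changed : Claim_changed_build_coinage_contexts := by
  unfold Claim_changed_build_coinage_contexts; decide

theorem build_coinage_contexts_tight : Claim_exact_build_coinage_contexts := by
  intro tba w _ hpre hD hEq
  obtain ⟨hnodup, _⟩ := hpre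
  obtain ⟨hw, p, hp, hlen, j, hjmem, hjneg, hreg⟩ := hD
  rw [List.mem_range] at hjmem
  have hmm : p.2.getD j "" ∈ p.2 := by
    rw [List.getD_eq_getElem _ _ hjmem]
    exact List.getElem_mem _
  have gA := pvFoldA_get w (p.2.getD j "") tba PySem.Dict.empty p hp hnodup hreg hmm
  have gB := pvFoldB_get w (p.2.getD j "") tba PySem.Dict.empty p hp hnodup hreg hmm
  have hdict : tba.foldl (pvStepA w) PySem.Dict.empty = tba.foldl (pvStepB w) PySem.Dict.empty :=
    PySem.Dict.ext hEq
  rw [hdict, gB] at gA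
  have hvals := Option.some.inj gA
  have hctxB : PySem.Set.ofList
      (((List.range p.2.length).filter
          (fun j' => decide (min ((pvLeft (p.2.getD j "") ((p.2.length : Int) + 1) p.2).getD j' 0)
              ((pvRight (p.2.getD j "") ((p.2.length : Int) + 1) p.2).getD j' 0) ≤ w))).map
        (fun j' => p.2.getD j' "")) = [] := by
    rw [pvFilterB_eq p.2 (p.2.getD j "") w hmm, if_pos hw]
    simp
  have hjocc : j ∈ pvOccs (p.2.getD j "") p.2 := by
    rw [pvOccs, List.mem_filter, List.mem_range]
    exact ⟨hjmem, by simp⟩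
  have hctxA : pvCtxA p.2 w ((pvOccs (p.2.getD j "") p.2).map (fun (i : Nat) => (i : Int))) ≠ [] := by
    rw [pvCtxA]
    apply pvFoldUpd_ne
    refine Or.inr ⟨(j : Int), List.mem_map_of_mem hjocc, ?_⟩
    exact pvSliceWrap_ne p.2 w j hw hjmem hjneg hlen
  rw [hctxB] at hvals
  exact hctxA hvals.symm
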